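-- pv_equiv track=rewrite | github.com/manabr0w/ASD-LAB-4 | matrix_utils.py | find_paths_from_powers
-- ===== SOURCE A (Python) =====
-- def multiply_matrixes(a, b):
--     n = len(a)
--     result = [[0 for _ in range(n)] for _ in range(n)]
--     for i in range(n):
--         for j in range(n):
--             for k in range(n):
--                 result[i][j] += a[i][k] * b[k][j]
--     return result
--
-- def get_power_matrix(matrix, power):
--     n = len(matrix)
--     powered_matrix = [[0 if row != col else 1 for col in range(n)] for row in range(n)]
--     while power > 0:
--         if power % 2 == 1:
--             powered_matrix = multiply_matrixes(powered_matrix, matrix)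
--         matrix = multiply_matrixes(matrix, matrix)
--         power //= 2
--     return powered_matrix
--
-- def find_paths_from_powers(matrix, power):
--     n = len(matrix)
--     matrix_power = get_power_matrix(matrix, power)
--
--     paths = []
--     if power == 2:
--         for i in range(n):
--             for j in range(n):
--                 if matrix_power[i][j] > 0:
--                     for k in range(n):
--                         if matrix[i][k] > 0 and matrix[k][j] > 0:
--                             paths.append([i + 1, k + 1, j + 1])
--     elif power == 3:
--         for i in range(n):
--             for j in range(n):
--                 if matrix_power[i][j] > 0:
--                     for k in range(n):
--                         if matrix[i][k] > 0:
--                             for x in range(n):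
--                                 if matrix[k][x] > 0 and matrix[x][j] > 0:
--                                     paths.append([i + 1, k + 1, x + 1, j + 1])
--
--     return paths
-- ===== SOURCE B (Python) =====
-- def multiply_matrixes(a, b):
--     n = len(a)
--     result = [[0 for _ in range(n)] for _ in range(n)]
--     for i in range(n):
--         for j in range(n):
--             for k in range(n):
--                 result[i][j] += a[i][k] * b[k][j]
--     return result
--
-- def get_power_matrix(matrix, power):
--     n = len(matrix)
--     powered_matrix = [[0 if row != col else 1 for col in range(n)] for row in range(n)]
--     while power > 0:
--         if power % 2 == 1:
--             powered_matrix = multiply_matrixes(powered_matrix, matrix)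
--         matrix = multiply_matrixes(matrix, matrix)
--         power //= 2
--     return powered_matrix
--
-- def _walks(matrix, v, steps):
--     # all walks of `steps` edges starting at v, as the list of visited
--     # vertices after v, enumerated depth-first with neighbours ascending
--     if steps == 0:
--         return [[]]
--     n = len(matrix)
--     return [[w] + t
--             for w in range(n) if matrix[v][w] > 0
--             for t in _walks(matrix, w, steps - 1)]
--
-- def find_paths_from_powers(matrix, power):
--     if power != 2 and power != 3:
--         return []
--     n = len(matrix)
--     matrix_power = get_power_matrix(matrix, power)
--     paths = []
--     for i in range(n):
--         ws = _walks(matrix, i, power)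
--         for j in range(n):
--             if matrix_power[i][j] > 0:
--                 for w in ws:
--                     if w[-1] == j:
--                         paths.append([i + 1] + [v + 1 for v in w])
--     return paths
-- ===== Notes on version B (the rewrite author's own statement) =====
-- stated objective: alternative
-- what changed: B replaces A's per-power hardcoded triple/quadruple nested range scans by one generic recursive walk enumerator _walks(matrix, v, steps) (depth-first over outgoing edges, shared by power 2 and 3) plus an endpoint-bucketing pass: for each start i it materialises all length-power walks once and then, per candidate endpoint j passing the matrix-power filter, emits the walks ending in j; the matrix_power > 0 filter is kept exactly.
import Mathlib
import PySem

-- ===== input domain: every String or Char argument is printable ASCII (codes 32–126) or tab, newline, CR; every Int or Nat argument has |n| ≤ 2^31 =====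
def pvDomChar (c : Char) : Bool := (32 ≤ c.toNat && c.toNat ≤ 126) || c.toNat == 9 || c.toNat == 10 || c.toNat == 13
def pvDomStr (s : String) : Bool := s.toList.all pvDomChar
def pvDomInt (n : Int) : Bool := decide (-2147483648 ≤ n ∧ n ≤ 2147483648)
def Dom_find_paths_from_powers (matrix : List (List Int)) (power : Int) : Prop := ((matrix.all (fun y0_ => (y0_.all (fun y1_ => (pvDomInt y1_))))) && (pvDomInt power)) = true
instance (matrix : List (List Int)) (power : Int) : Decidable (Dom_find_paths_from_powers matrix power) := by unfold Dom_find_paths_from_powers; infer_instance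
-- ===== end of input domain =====

-- B replaces A's per-power hardcoded nested range scans by one generic recursive walk
-- enumerator (shared by power 2 and 3) plus an endpoint-bucketing pass; the matrix-power > 0
-- filter is kept exactly. Return-value equivalence; neither mutates its input.

-- ===== PORT A =====
-- shared helper (identical source code in both Pythons): multiply_matrixes.
-- result[i][j] += … is ported as List.modify at i.toNat/j.toNat; indices come from
-- range(n) so they are nonnegative and (for the n×n accumulator) in range, exactly Python.
def multiply_matrixes (a b : List (List Int)) : List (List Int) :=
  let n : Int := (a.length : Int)
  let result : List (List Int) :=
    (PySem.List.pyRange 0 n 1).map (fun _ => (PySem.List.pyRange 0 n 1).map (fun _ => (0 : Int)))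
  (PySem.List.pyRange 0 n 1).foldl (fun res i =>
    (PySem.List.pyRange 0 n 1).foldl (fun res j =>
      (PySem.List.pyRange 0 n 1).foldl (fun res k =>
        res.modify i.toNat (fun row => row.modify j.toNat (fun v =>
          v + PySem.List.pyGetD (PySem.List.pyGetD a i []) k 0
              * PySem.List.pyGetD (PySem.List.pyGetD b k []) j 0)))
        res) res) result

-- the 'while power > 0' loop of get_power_matrix (shared helper)
def pvPowerLoop (pm matrix : List (List Int)) (power : Int) : List (List Int) :=
  if _h : 0 < power then
    pvPowerLoop (if PySem.Int.mod power 2 == 1 then multiply_matrixes pm matrix else pm)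
      (multiply_matrixes matrix matrix) (PySem.Int.floordiv power 2)
  else pm
termination_by power.toNat
decreasing_by
  rw [PySem.Int.floordiv_eq_ediv_of_pos (by omega : (0:Int) < 2)]
  omega

def get_power_matrix (matrix : List (List Int)) (power : Int) : List (List Int) :=
  let n : Int := (matrix.length : Int)
  let powered_matrix : List (List Int) :=
    (PySem.List.pyRange 0 n 1).map (fun row =>
      (PySem.List.pyRange 0 n 1).map (fun col => if row ≠ col then (0 : Int) else 1))
  pvPowerLoop powered_matrix matrix power

def find_paths_from_powers (matrix : List (List Int)) (power : Int) : List (List Int) :=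
  let n : Int := (matrix.length : Int)
  let matrix_power := get_power_matrix matrix power
  if power = 2 then
    (PySem.List.pyRange 0 n 1).foldl (fun paths i =>
      (PySem.List.pyRange 0 n 1).foldl (fun paths j =>
        if PySem.List.pyGetD (PySem.List.pyGetD matrix_power i []) j 0 > 0 then
          (PySem.List.pyRange 0 n 1).foldl (fun paths k =>
            if PySem.List.pyGetD (PySem.List.pyGetD matrix i []) k 0 > 0 ∧
               PySem.List.pyGetD (PySem.List.pyGetD matrix k []) j 0 > 0 then
              paths ++ [[i + 1, k + 1, j + 1]]
            else paths) paths
        else paths) paths) []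
  else if power = 3 then
    (PySem.List.pyRange 0 n 1).foldl (fun paths i =>
      (PySem.List.pyRange 0 n 1).foldl (fun paths j =>
        if PySem.List.pyGetD (PySem.List.pyGetD matrix_power i []) j 0 > 0 then
          (PySem.List.pyRange 0 n 1).foldl (fun paths k =>
            if PySem.List.pyGetD (PySem.List.pyGetD matrix i []) k 0 > 0 then
              (PySem.List.pyRange 0 n 1).foldl (fun paths x =>
                if PySem.List.pyGetD (PySem.List.pyGetD matrix k []) x 0 > 0 ∧
                   PySem.List.pyGetD (PySem.List.pyGetD matrix x []) j 0 > 0 then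
                  paths ++ [[i + 1, k + 1, x + 1, j + 1]]
                else paths) paths
            else paths) paths
        else paths) paths) []
  else []

-- ===== PORT B =====
-- _walks(matrix, v, steps): recursion on steps (B only calls it with steps = power ∈ {2,3},
-- so the Nat argument is power.toNat at the call site)
def pvWalks (matrix : List (List Int)) (v : Int) : Nat → List (List Int)
  | 0 => [[]]
  | steps + 1 =>
    (PySem.List.pyRange 0 (matrix.length : Int) 1).flatMap (fun w =>
      if PySem.List.pyGetD (PySem.List.pyGetD matrix v []) w 0 > 0 then
        (pvWalks matrix w steps).map (fun t => w :: t)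
      else [])

def find_paths_from_powers_alt (matrix : List (List Int)) (power : Int) : List (List Int) :=
  if power ≠ 2 ∧ power ≠ 3 then []
  else
    let n : Int := (matrix.length : Int)
    let matrix_power := get_power_matrix matrix power
    (PySem.List.pyRange 0 n 1).foldl (fun paths i =>
      let ws := pvWalks matrix i power.toNat
      (PySem.List.pyRange 0 n 1).foldl (fun paths j =>
        if PySem.List.pyGetD (PySem.List.pyGetD matrix_power i []) j 0 > 0 then
          ws.foldl (fun paths w =>
            if PySem.List.pyGetD w (-1) 0 = j then
              paths ++ [(i + 1) :: w.map (· + 1)]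
            else paths) paths
        else paths) paths) []

-- ===== PRECONDITION & SPEC =====
-- Python A raises IndexError (inside multiply_matrixes) exactly when power ≥ 1 and some row of
-- matrix is shorter than len(matrix); those inputs are excluded. Rows may be longer than n.
def Pre_find_paths_from_powers (matrix : List (List Int)) (power : Int) : Prop :=
  0 < power → ∀ row ∈ matrix, matrix.length ≤ row.length
instance (matrix : List (List Int)) (power : Int) : Decidable (Pre_find_paths_from_powers matrix power) := by unfold Pre_find_paths_from_powers; infer_instance

def pvWitness_find_paths_from_powers : List (List Int) × Int := ([[0, 1], [1, 0]], 2)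

def Spec_find_paths_from_powers (matrix : List (List Int)) (power : Int) (out : List (List Int)) : Prop := out = find_paths_from_powers_alt matrix power
instance (matrix : List (List Int)) (power : Int) (out : List (List Int)) : Decidable (Spec_find_paths_from_powers matrix power out) := by unfold Spec_find_paths_from_powers; infer_instance

-- ===== CLAIM (what is proved, stated in full; the proofs are below) =====
def Claim_equal_find_paths_from_powers : Prop := ∀ (matrix : List (List Int)) (power : Int), Dom_find_paths_from_powers matrix power → Pre_find_paths_from_powers matrix power → Spec_find_paths_from_powers matrix power (find_paths_from_powers matrix power)


-- ===== LEMMAS AND PROOFS =====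

-- w[-1] reads the last element: stepping over the head of a cons with nonempty tail
theorem pv_last_cons (a b : Int) (u : List Int) :
    PySem.List.pyGetD (a :: b :: u) (-1) 0 = PySem.List.pyGetD (b :: u) (-1) 0 := by
  simp only [PySem.List.pyGetD, PySem.List.pyGet?, PySem.List.pyIdx?, List.length_cons]
  norm_num
  rfl

theorem pv_last_single (k : Int) : PySem.List.pyGetD [k] (-1) 0 = k := by
  simp [PySem.List.pyGetD, PySem.List.pyGet?, PySem.List.pyIdx?]

theorem pv_range_nodup (n : Nat) : (PySem.List.pyRange 0 (n : Int) 1).Nodup := by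
  rw [PySem.List.pyRange_zero_natCast]
  exact List.nodup_range.map (fun a b hab => by exact_mod_cast hab)

-- flatMap of a 'fire only at k = j' body over a duplicate-free list containing j
theorem pv_flatMap_single {alpha : Type} (g : Int → List alpha) (l : List Int) (j : Int)
    (hnd : l.Nodup) (hj : j ∈ l) :
    l.flatMap (fun k => if k = j then g k else []) = g j := by
  induction l with
  | nil => simp at hj
  | cons a t ih =>
    rcases List.nodup_cons.mp hnd with ⟨ha, ht⟩
    by_cases h : j = a
    · subst h
      rw [List.flatMap_cons, if_pos rfl]
      have hnil : t.flatMap (fun k => if k = j then g k else []) = [] := by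
        apply List.flatMap_eq_nil_iff.mpr
        intro k hk
        rw [if_neg]
        intro hkj
        exact ha (hkj ▸ hk)
      rw [hnil, List.append_nil]
    · have h' : j ∈ t := by
        rcases List.mem_cons.mp hj with h2 | h2
        · exact absurd h2 h
        · exact h2
      rw [List.flatMap_cons, if_neg (fun hh => h hh.symm), List.nil_append, ih ht h']

theorem pv_walks_ne_nil (matrix : List (List Int)) (v : Int) (s : Nat) :
    ∀ w ∈ pvWalks matrix v (s + 1), w ≠ [] := by
  intro w hw
  rw [pvWalks] at hw
  rw [List.mem_flatMap] at hw
  obtain ⟨k, _, hw⟩ := hw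
  by_cases hc : PySem.List.pyGetD (PySem.List.pyGetD matrix v []) k 0 > 0
  · rw [if_pos hc, List.mem_map] at hw
    obtain ⟨t, _, rfl⟩ := hw
    simp
  · rw [if_neg hc] at hw
    simp at hw

-- the 'w[-1] == j' filter commutes with prepending a vertex to nonempty walks
theorem pv_filter_map_cons (k j : Int) (l : List (List Int)) (h : ∀ t ∈ l, t ≠ []) :
    ((l.map (fun t => k :: t)).filter (fun w => decide (PySem.List.pyGetD w (-1) 0 = j)))
    = (l.filter (fun t => decide (PySem.List.pyGetD t (-1) 0 = j))).map (fun t => k :: t) := by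
  rw [List.filter_map]
  congr 1
  apply List.filter_congr
  intro t ht
  cases t with
  | nil => exact absurd rfl (h [] ht)
  | cons b u => simp only [Function.comp_apply, pv_last_cons]

theorem pv_Wstep (matrix : List (List Int)) (v j : Int) (s : Nat) (hs : 0 < s) :
    (pvWalks matrix v (s + 1)).filter (fun w => decide (PySem.List.pyGetD w (-1) 0 = j))
    = (PySem.List.pyRange 0 (matrix.length : Int) 1).flatMap (fun k =>
        if PySem.List.pyGetD (PySem.List.pyGetD matrix v []) k 0 > 0 then
          ((pvWalks matrix k s).filter (fun w => decide (PySem.List.pyGetD w (-1) 0 = j))).map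
            (fun t => k :: t)
        else []) := by
  rw [pvWalks, List.filter_flatMap]
  apply List.flatMap_congr
  intro k _
  by_cases hc : PySem.List.pyGetD (PySem.List.pyGetD matrix v []) k 0 > 0
  · rw [if_pos hc, if_pos hc]
    obtain ⟨s', rfl⟩ : ∃ s', s = s' + 1 := ⟨s - 1, by omega⟩
    exact pv_filter_map_cons k j _ (pv_walks_ne_nil matrix k s')
  · rw [if_neg hc, if_neg hc, List.filter_nil]

theorem pv_W1 (matrix : List (List Int)) (v j : Int)
    (hj : j ∈ PySem.List.pyRange 0 (matrix.length : Int) 1) :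
    (pvWalks matrix v 1).filter (fun w => decide (PySem.List.pyGetD w (-1) 0 = j))
    = if PySem.List.pyGetD (PySem.List.pyGetD matrix v []) j 0 > 0 then [[j]] else [] := by
  rw [show (1 : Nat) = 0 + 1 from rfl, pvWalks, List.filter_flatMap]
  rw [List.flatMap_congr (g := fun k =>
    if k = j then (if PySem.List.pyGetD (PySem.List.pyGetD matrix v []) k 0 > 0 then [[k]] else [])
    else [])]
  · exact pv_flatMap_single _ _ _ (by simpa using pv_range_nodup matrix.length) hj
  · intro k _
    by_cases hc : PySem.List.pyGetD (PySem.List.pyGetD matrix v []) k 0 > 0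
    · by_cases hkj : k = j
      · subst hkj
        simp [hc, pvWalks, pv_last_single]
      · simp [hc, hkj, pvWalks, pv_last_single]
    · simp [hc]

theorem pv_W2 (matrix : List (List Int)) (v j : Int)
    (hj : j ∈ PySem.List.pyRange 0 (matrix.length : Int) 1) :
    (pvWalks matrix v 2).filter (fun w => decide (PySem.List.pyGetD w (-1) 0 = j))
    = (PySem.List.pyRange 0 (matrix.length : Int) 1).flatMap (fun k =>
        if PySem.List.pyGetD (PySem.List.pyGetD matrix v []) k 0 > 0 then
          (if PySem.List.pyGetD (PySem.List.pyGetD matrix k []) j 0 > 0 then [[k, j]] else [])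
        else []) := by
  rw [show (2 : Nat) = 1 + 1 from rfl, pv_Wstep matrix v j 1 (by omega)]
  apply List.flatMap_congr
  intro k _
  by_cases hc : PySem.List.pyGetD (PySem.List.pyGetD matrix v []) k 0 > 0
  · rw [if_pos hc, if_pos hc, pv_W1 matrix k j hj]
    by_cases hd : PySem.List.pyGetD (PySem.List.pyGetD matrix k []) j 0 > 0
    · simp [hd]
    · simp [hd]
  · rw [if_neg hc, if_neg hc]

theorem pv_W3 (matrix : List (List Int)) (v j : Int)
    (hj : j ∈ PySem.List.pyRange 0 (matrix.length : Int) 1) :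
    (pvWalks matrix v 3).filter (fun w => decide (PySem.List.pyGetD w (-1) 0 = j))
    = (PySem.List.pyRange 0 (matrix.length : Int) 1).flatMap (fun k =>
        if PySem.List.pyGetD (PySem.List.pyGetD matrix v []) k 0 > 0 then
          (PySem.List.pyRange 0 (matrix.length : Int) 1).flatMap (fun x =>
            if PySem.List.pyGetD (PySem.List.pyGetD matrix k []) x 0 > 0 then
              (if PySem.List.pyGetD (PySem.List.pyGetD matrix x []) j 0 > 0 then [[k, x, j]] else [])
            else [])
        else []) := by
  rw [show (3 : Nat) = 2 + 1 from rfl, pv_Wstep matrix v j 2 (by omega)]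
  apply List.flatMap_congr
  intro k _
  by_cases hc : PySem.List.pyGetD (PySem.List.pyGetD matrix v []) k 0 > 0
  · rw [if_pos hc, if_pos hc, pv_W2 matrix k j hj, List.map_flatMap]
    apply List.flatMap_congr
    intro x _
    by_cases hd : PySem.List.pyGetD (PySem.List.pyGetD matrix k []) x 0 > 0
    · by_cases he : PySem.List.pyGetD (PySem.List.pyGetD matrix x []) j 0 > 0
      · simp [hd, he]
      · simp [hd, he]
    · simp [hd]
  · rw [if_neg hc, if_neg hc]

-- a filtered map is a flatMap of conditional singletons
theorem pv_filter_map_eq_flatMap {alpha beta : Type} (l : List alpha) (p : alpha → Prop)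
    [DecidablePred p] (f : alpha → beta) :
    (l.filter (fun x => decide (p x))).map f = l.flatMap (fun x => if p x then [f x] else []) := by
  induction l with
  | nil => rfl
  | cons a t ih => by_cases h : p a <;> simp [h, ih]

-- A's power-2 accumulator loop, as a flatMap of per-(i,j) blocks
theorem pv_A2 (matrix mp : List (List Int)) :
    (PySem.List.pyRange 0 (matrix.length : Int) 1).foldl (fun paths i =>
      (PySem.List.pyRange 0 (matrix.length : Int) 1).foldl (fun paths j =>
        if PySem.List.pyGetD (PySem.List.pyGetD mp i []) j 0 > 0 then
          (PySem.List.pyRange 0 (matrix.length : Int) 1).foldl (fun paths k =>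
            if PySem.List.pyGetD (PySem.List.pyGetD matrix i []) k 0 > 0 ∧
               PySem.List.pyGetD (PySem.List.pyGetD matrix k []) j 0 > 0 then
              paths ++ [[i + 1, k + 1, j + 1]]
            else paths) paths
        else paths) paths) []
    = (PySem.List.pyRange 0 (matrix.length : Int) 1).flatMap (fun i =>
        (PySem.List.pyRange 0 (matrix.length : Int) 1).flatMap (fun j =>
          if PySem.List.pyGetD (PySem.List.pyGetD mp i []) j 0 > 0 then
            ((PySem.List.pyRange 0 (matrix.length : Int) 1).filter (fun k =>
              decide (PySem.List.pyGetD (PySem.List.pyGetD matrix i []) k 0 > 0 ∧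
                PySem.List.pyGetD (PySem.List.pyGetD matrix k []) j 0 > 0))).map
              (fun k => [i + 1, k + 1, j + 1])
          else [])) := by
  rw [PySem.List.foldl_congr_mem (g := fun paths i => paths ++
      (PySem.List.pyRange 0 (matrix.length : Int) 1).flatMap (fun j =>
        if PySem.List.pyGetD (PySem.List.pyGetD mp i []) j 0 > 0 then
          ((PySem.List.pyRange 0 (matrix.length : Int) 1).filter (fun k =>
            decide (PySem.List.pyGetD (PySem.List.pyGetD matrix i []) k 0 > 0 ∧
              PySem.List.pyGetD (PySem.List.pyGetD matrix k []) j 0 > 0))).map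
            (fun k => [i + 1, k + 1, j + 1])
        else []))]
  · rw [PySem.List.foldl_append_eq_flatMap]
    simp
  · intro paths i _
    have hbody : (fun (paths : List (List Int)) (j : Int) =>
        if PySem.List.pyGetD (PySem.List.pyGetD mp i []) j 0 > 0 then
          (PySem.List.pyRange 0 (matrix.length : Int) 1).foldl (fun paths k =>
            if PySem.List.pyGetD (PySem.List.pyGetD matrix i []) k 0 > 0 ∧
               PySem.List.pyGetD (PySem.List.pyGetD matrix k []) j 0 > 0 then
              paths ++ [[i + 1, k + 1, j + 1]]
            else paths) paths
        else paths)
      = (fun (paths : List (List Int)) (j : Int) => paths ++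
          (if PySem.List.pyGetD (PySem.List.pyGetD mp i []) j 0 > 0 then
            ((PySem.List.pyRange 0 (matrix.length : Int) 1).filter (fun k =>
              decide (PySem.List.pyGetD (PySem.List.pyGetD matrix i []) k 0 > 0 ∧
                PySem.List.pyGetD (PySem.List.pyGetD matrix k []) j 0 > 0))).map
              (fun k => [i + 1, k + 1, j + 1])
          else [])) := by
      funext paths j
      by_cases hmp : PySem.List.pyGetD (PySem.List.pyGetD mp i []) j 0 > 0
      · rw [if_pos hmp, if_pos hmp, PySem.List.foldl_append_ite]
      · rw [if_neg hmp, if_neg hmp, List.append_nil]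
    rw [hbody, PySem.List.foldl_append_eq_flatMap]

-- A's power-3 accumulator loop, as a flatMap of per-(i,j) blocks
theorem pv_A3 (matrix mp : List (List Int)) :
    (PySem.List.pyRange 0 (matrix.length : Int) 1).foldl (fun paths i =>
      (PySem.List.pyRange 0 (matrix.length : Int) 1).foldl (fun paths j =>
        if PySem.List.pyGetD (PySem.List.pyGetD mp i []) j 0 > 0 then
          (PySem.List.pyRange 0 (matrix.length : Int) 1).foldl (fun paths k =>
            if PySem.List.pyGetD (PySem.List.pyGetD matrix i []) k 0 > 0 then
              (PySem.List.pyRange 0 (matrix.length : Int) 1).foldl (fun paths x =>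
                if PySem.List.pyGetD (PySem.List.pyGetD matrix k []) x 0 > 0 ∧
                   PySem.List.pyGetD (PySem.List.pyGetD matrix x []) j 0 > 0 then
                  paths ++ [[i + 1, k + 1, x + 1, j + 1]]
                else paths) paths
            else paths) paths
        else paths) paths) []
    = (PySem.List.pyRange 0 (matrix.length : Int) 1).flatMap (fun i =>
        (PySem.List.pyRange 0 (matrix.length : Int) 1).flatMap (fun j =>
          if PySem.List.pyGetD (PySem.List.pyGetD mp i []) j 0 > 0 then
            (PySem.List.pyRange 0 (matrix.length : Int) 1).flatMap (fun k =>
              if PySem.List.pyGetD (PySem.List.pyGetD matrix i []) k 0 > 0 then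
                ((PySem.List.pyRange 0 (matrix.length : Int) 1).filter (fun x =>
                  decide (PySem.List.pyGetD (PySem.List.pyGetD matrix k []) x 0 > 0 ∧
                    PySem.List.pyGetD (PySem.List.pyGetD matrix x []) j 0 > 0))).map
                  (fun x => [i + 1, k + 1, x + 1, j + 1])
              else [])
          else [])) := by
  rw [PySem.List.foldl_congr_mem (g := fun paths i => paths ++
      (PySem.List.pyRange 0 (matrix.length : Int) 1).flatMap (fun j =>
        if PySem.List.pyGetD (PySem.List.pyGetD mp i []) j 0 > 0 then
          (PySem.List.pyRange 0 (matrix.length : Int) 1).flatMap (fun k =>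
            if PySem.List.pyGetD (PySem.List.pyGetD matrix i []) k 0 > 0 then
              ((PySem.List.pyRange 0 (matrix.length : Int) 1).filter (fun x =>
                decide (PySem.List.pyGetD (PySem.List.pyGetD matrix k []) x 0 > 0 ∧
                  PySem.List.pyGetD (PySem.List.pyGetD matrix x []) j 0 > 0))).map
                (fun x => [i + 1, k + 1, x + 1, j + 1])
            else [])
        else []))]
  · rw [PySem.List.foldl_append_eq_flatMap]
    simp
  · intro paths i _
    have hbody : (fun (paths : List (List Int)) (j : Int) =>
        if PySem.List.pyGetD (PySem.List.pyGetD mp i []) j 0 > 0 then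
          (PySem.List.pyRange 0 (matrix.length : Int) 1).foldl (fun paths k =>
            if PySem.List.pyGetD (PySem.List.pyGetD matrix i []) k 0 > 0 then
              (PySem.List.pyRange 0 (matrix.length : Int) 1).foldl (fun paths x =>
                if PySem.List.pyGetD (PySem.List.pyGetD matrix k []) x 0 > 0 ∧
                   PySem.List.pyGetD (PySem.List.pyGetD matrix x []) j 0 > 0 then
                  paths ++ [[i + 1, k + 1, x + 1, j + 1]]
                else paths) paths
            else paths) paths
        else paths)
      = (fun (paths : List (List Int)) (j : Int) => paths ++
          (if PySem.List.pyGetD (PySem.List.pyGetD mp i []) j 0 > 0 then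
            (PySem.List.pyRange 0 (matrix.length : Int) 1).flatMap (fun k =>
              if PySem.List.pyGetD (PySem.List.pyGetD matrix i []) k 0 > 0 then
                ((PySem.List.pyRange 0 (matrix.length : Int) 1).filter (fun x =>
                  decide (PySem.List.pyGetD (PySem.List.pyGetD matrix k []) x 0 > 0 ∧
                    PySem.List.pyGetD (PySem.List.pyGetD matrix x []) j 0 > 0))).map
                  (fun x => [i + 1, k + 1, x + 1, j + 1])
              else [])
          else [])) := by
      funext paths j
      by_cases hmp : PySem.List.pyGetD (PySem.List.pyGetD mp i []) j 0 > 0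
      · rw [if_pos hmp, if_pos hmp]
        have hk : (fun (paths : List (List Int)) (k : Int) =>
            if PySem.List.pyGetD (PySem.List.pyGetD matrix i []) k 0 > 0 then
              (PySem.List.pyRange 0 (matrix.length : Int) 1).foldl (fun paths x =>
                if PySem.List.pyGetD (PySem.List.pyGetD matrix k []) x 0 > 0 ∧
                   PySem.List.pyGetD (PySem.List.pyGetD matrix x []) j 0 > 0 then
                  paths ++ [[i + 1, k + 1, x + 1, j + 1]]
                else paths) paths
            else paths)
          = (fun (paths : List (List Int)) (k : Int) => paths ++
              (if PySem.List.pyGetD (PySem.List.pyGetD matrix i []) k 0 > 0 then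
                ((PySem.List.pyRange 0 (matrix.length : Int) 1).filter (fun x =>
                  decide (PySem.List.pyGetD (PySem.List.pyGetD matrix k []) x 0 > 0 ∧
                    PySem.List.pyGetD (PySem.List.pyGetD matrix x []) j 0 > 0))).map
                  (fun x => [i + 1, k + 1, x + 1, j + 1])
              else [])) := by
          funext paths k
          by_cases hc : PySem.List.pyGetD (PySem.List.pyGetD matrix i []) k 0 > 0
          · rw [if_pos hc, if_pos hc, PySem.List.foldl_append_ite]
          · rw [if_neg hc, if_neg hc, List.append_nil]
        rw [hk, PySem.List.foldl_append_eq_flatMap]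
      · rw [if_neg hmp, if_neg hmp, List.append_nil]
    rw [hbody, PySem.List.foldl_append_eq_flatMap]

-- B's bucketing loop, as a flatMap of per-(i,j) blocks
theorem pv_B (matrix mp : List (List Int)) (p : Nat) :
    (PySem.List.pyRange 0 (matrix.length : Int) 1).foldl (fun paths i =>
      let ws := pvWalks matrix i p
      (PySem.List.pyRange 0 (matrix.length : Int) 1).foldl (fun paths j =>
        if PySem.List.pyGetD (PySem.List.pyGetD mp i []) j 0 > 0 then
          ws.foldl (fun paths w =>
            if PySem.List.pyGetD w (-1) 0 = j then
              paths ++ [(i + 1) :: w.map (· + 1)]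
            else paths) paths
        else paths) paths) []
    = (PySem.List.pyRange 0 (matrix.length : Int) 1).flatMap (fun i =>
        (PySem.List.pyRange 0 (matrix.length : Int) 1).flatMap (fun j =>
          if PySem.List.pyGetD (PySem.List.pyGetD mp i []) j 0 > 0 then
            ((pvWalks matrix i p).filter (fun w =>
              decide (PySem.List.pyGetD w (-1) 0 = j))).map
              (fun w => (i + 1) :: w.map (· + 1))
          else [])) := by
  rw [PySem.List.foldl_congr_mem (g := fun paths i => paths ++
      (PySem.List.pyRange 0 (matrix.length : Int) 1).flatMap (fun j =>
        if PySem.List.pyGetD (PySem.List.pyGetD mp i []) j 0 > 0 then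
          ((pvWalks matrix i p).filter (fun w =>
            decide (PySem.List.pyGetD w (-1) 0 = j))).map
            (fun w => (i + 1) :: w.map (· + 1))
        else []))]
  · rw [PySem.List.foldl_append_eq_flatMap]
    simp
  · intro paths i _
    show (PySem.List.pyRange 0 (matrix.length : Int) 1).foldl _ paths = _
    have hbody : (fun (paths : List (List Int)) (j : Int) =>
        if PySem.List.pyGetD (PySem.List.pyGetD mp i []) j 0 > 0 then
          (pvWalks matrix i p).foldl (fun paths w =>
            if PySem.List.pyGetD w (-1) 0 = j then
              paths ++ [(i + 1) :: w.map (· + 1)]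
            else paths) paths
        else paths)
      = (fun (paths : List (List Int)) (j : Int) => paths ++
          (if PySem.List.pyGetD (PySem.List.pyGetD mp i []) j 0 > 0 then
            ((pvWalks matrix i p).filter (fun w =>
              decide (PySem.List.pyGetD w (-1) 0 = j))).map
              (fun w => (i + 1) :: w.map (· + 1))
          else [])) := by
      funext paths j
      by_cases hmp : PySem.List.pyGetD (PySem.List.pyGetD mp i []) j 0 > 0
      · rw [if_pos hmp, if_pos hmp, PySem.List.foldl_append_ite]
      · rw [if_neg hmp, if_neg hmp, List.append_nil]
    rw [hbody, PySem.List.foldl_append_eq_flatMap]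

-- per-(i,j) agreement, power 2
theorem pv_inner2 (matrix : List (List Int)) (i j : Int)
    (hj : j ∈ PySem.List.pyRange 0 (matrix.length : Int) 1) :
    ((PySem.List.pyRange 0 (matrix.length : Int) 1).filter (fun k =>
      decide (PySem.List.pyGetD (PySem.List.pyGetD matrix i []) k 0 > 0 ∧
        PySem.List.pyGetD (PySem.List.pyGetD matrix k []) j 0 > 0))).map
      (fun k => [i + 1, k + 1, j + 1])
    = ((pvWalks matrix i 2).filter (fun w =>
        decide (PySem.List.pyGetD w (-1) 0 = j))).map (fun w => (i + 1) :: w.map (· + 1)) := by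
  rw [pv_W2 matrix i j hj, List.map_flatMap, pv_filter_map_eq_flatMap]
  apply List.flatMap_congr
  intro k _
  by_cases hc : PySem.List.pyGetD (PySem.List.pyGetD matrix i []) k 0 > 0
  · by_cases hd : PySem.List.pyGetD (PySem.List.pyGetD matrix k []) j 0 > 0
    · simp [hc, hd]
    · simp [hc, hd]
  · simp [hc]

-- per-(i,j) agreement, power 3
theorem pv_inner3 (matrix : List (List Int)) (i j : Int)
    (hj : j ∈ PySem.List.pyRange 0 (matrix.length : Int) 1) :
    (PySem.List.pyRange 0 (matrix.length : Int) 1).flatMap (fun k =>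
      if PySem.List.pyGetD (PySem.List.pyGetD matrix i []) k 0 > 0 then
        ((PySem.List.pyRange 0 (matrix.length : Int) 1).filter (fun x =>
          decide (PySem.List.pyGetD (PySem.List.pyGetD matrix k []) x 0 > 0 ∧
            PySem.List.pyGetD (PySem.List.pyGetD matrix x []) j 0 > 0))).map
          (fun x => [i + 1, k + 1, x + 1, j + 1])
      else [])
    = ((pvWalks matrix i 3).filter (fun w =>
        decide (PySem.List.pyGetD w (-1) 0 = j))).map (fun w => (i + 1) :: w.map (· + 1)) := by
  rw [pv_W3 matrix i j hj, List.map_flatMap]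
  apply List.flatMap_congr
  intro k _
  by_cases hc : PySem.List.pyGetD (PySem.List.pyGetD matrix i []) k 0 > 0
  · rw [if_pos hc, if_pos hc, List.map_flatMap, pv_filter_map_eq_flatMap]
    apply List.flatMap_congr
    intro x _
    by_cases hd : PySem.List.pyGetD (PySem.List.pyGetD matrix k []) x 0 > 0
    · by_cases he : PySem.List.pyGetD (PySem.List.pyGetD matrix x []) j 0 > 0
      · simp [hd, he]
      · simp [hd, he]
    · simp [hd]
  · rw [if_neg hc, if_neg hc]
    simp

-- ===== VERDICT (by name: the statement is the Claim_ definition above) =====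
theorem find_paths_from_powers_spec : Claim_equal_find_paths_from_powers := by
  intro matrix power _hdom _hpre
  unfold Spec_find_paths_from_powers find_paths_from_powers find_paths_from_powers_alt
  by_cases hp2 : power = 2
  · subst hp2
    simp only [reduceIte, show ((2:Int)).toNat = 2 from rfl]
    rw [pv_A2 matrix (get_power_matrix matrix 2), pv_B matrix (get_power_matrix matrix 2) 2]
    apply List.flatMap_congr
    intro i _
    apply List.flatMap_congr
    intro j hj
    by_cases hmp : PySem.List.pyGetD (PySem.List.pyGetD (get_power_matrix matrix 2) i []) j 0 > 0
    · rw [if_pos hmp, if_pos hmp, pv_inner2 matrix i j hj]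
    · rw [if_neg hmp, if_neg hmp]
  · by_cases hp3 : power = 3
    · subst hp3
      simp only [reduceIte, show ((3:Int)).toNat = 3 from rfl]
      rw [pv_A3 matrix (get_power_matrix matrix 3), pv_B matrix (get_power_matrix matrix 3) 3]
      apply List.flatMap_congr
      intro i _
      apply List.flatMap_congr
      intro j hj
      by_cases hmp : PySem.List.pyGetD (PySem.List.pyGetD (get_power_matrix matrix 3) i []) j 0 > 0
      · rw [if_pos hmp, if_pos hmp, pv_inner3 matrix i j hj]
      · rw [if_neg hmp, if_neg hmp]
    · rw [if_neg hp2, if_neg hp3, if_pos ⟨hp2, hp3⟩]
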